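-- pv_equiv track=rewrite | github.com/tornaria/lmfdb | lmfdb/modular_curves/web_curve.py | formatted_dims
-- ===== SOURCE A (Python) =====
-- from collections import Counter
--
-- def showexp(c, wrap=True):
--     if c == 1:
--         return ""
--     elif wrap:
--         return f"$^{{{c}}}$"
--     else:
--         return f"^{{{c}}}"
--
-- def formatted_dims(dims, mults):
--     if not dims:
--         return ""
--     # Collapse newforms with the same dimension
--     collapsed = Counter()
--     for d, c in zip(dims, mults):
--         collapsed[d] += c
--     dims, mults = zip(*(sorted(collapsed.items())))
--     return "$" + r"\cdot".join(f"{d}{showexp(c, wrap=False)}" for (d, c) in zip(dims, mults)) + "$"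
-- ===== SOURCE B (Python) =====
-- def showexp(c, wrap=True):
--     if c == 1:
--         return ""
--     elif wrap:
--         return f"$^{{{c}}}$"
--     else:
--         return f"^{{{c}}}"
--
-- def formatted_dims(dims, mults):
--     if not dims:
--         return ""
--     # Sort the (dimension, multiplicity) pairs by dimension, then collapse
--     # consecutive runs of equal dimension in one linear pass, summing counts.
--     pairs = sorted(zip(dims, mults), key=lambda p: p[0])
--     parts = []
--     i = 0
--     n = len(pairs)
--     while i < n:
--         d = pairs[i][0]
--         total = 0
--         while i < n and pairs[i][0] == d:
--             total += pairs[i][1]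
--             i += 1
--         parts.append(f"{d}{showexp(total, wrap=False)}")
--     return "$" + r"\cdot".join(parts) + "$"
-- ===== Notes on version B (the rewrite author's own statement) =====
-- stated objective: alternative
-- what changed: Replaced the Counter-dict aggregation followed by sorting the dict items and zip(*)-unpacking with a single stable sort of the (dim, mult) pairs followed by one linear run-grouping pass that sums each run of equal dimensions.
import Mathlib
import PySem

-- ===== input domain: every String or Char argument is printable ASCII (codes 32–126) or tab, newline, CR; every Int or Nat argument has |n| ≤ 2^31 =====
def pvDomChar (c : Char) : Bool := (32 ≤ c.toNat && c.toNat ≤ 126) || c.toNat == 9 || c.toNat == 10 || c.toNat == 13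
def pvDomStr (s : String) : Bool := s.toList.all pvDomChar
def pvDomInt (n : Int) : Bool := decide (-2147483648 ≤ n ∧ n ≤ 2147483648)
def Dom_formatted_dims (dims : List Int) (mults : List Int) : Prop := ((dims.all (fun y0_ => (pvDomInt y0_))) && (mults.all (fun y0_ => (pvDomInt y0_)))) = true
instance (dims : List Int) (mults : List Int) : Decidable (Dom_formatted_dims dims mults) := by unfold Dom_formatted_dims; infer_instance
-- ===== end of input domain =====

-- B replaces A's Counter aggregation + sorted items + zip(*) unpacking with one
-- stable sort of the pairs followed by a linear run-grouping pass (objective: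
-- alternative decomposition, same asymptotic cost).

-- showexp(c, wrap=False) — defined identically in A and in Source B
def fdShowexp (c : Int) : String :=
  if c = 1 then "" else "^{" ++ PySem.Int.toStr c ++ "}"

-- ===== PORT A =====

def formatted_dims (dims : List Int) (mults : List Int) : String :=
  if dims = [] then ""
  else
    -- collapsed = Counter(); for d, c in zip(dims, mults): collapsed[d] += c
    let collapsed : PySem.Dict Int Int :=
      (dims.zip mults).foldl (fun d p => d.modify p.1 0 (· + p.2)) PySem.Dict.empty
    -- sorted(collapsed.items())  (Python tuple comparison)
    let items := PySem.List.sorted2 collapsed.items Prod.fst Prod.snd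
    -- dims, mults = zip(*items); then the joined generator over zip(dims, mults)
    let u := items.unzip
    "$" ++ PySem.Str.join "\\cdot"
      ((u.1.zip u.2).map (fun p => PySem.Int.toStr p.1 ++ fdShowexp p.2)) ++ "$"

-- ===== PORT B =====
-- Source B's while loop: collapse each run of equal dimensions, summing the counts
def fdGroups : List (Int × Int) → List (Int × Int)
  | [] => []
  | (d, c) :: t =>
    let run := t.takeWhile (fun p => p.1 == d)
    let rest := t.dropWhile (fun p => p.1 == d)
    (d, c + (run.map Prod.snd).sum) :: fdGroups rest
termination_by l => l.length
decreasing_by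
  simp only [List.length_cons]
  have := List.length_dropWhile_le (fun p => p.1 == d) t
  omega

def formatted_dims_alt (dims : List Int) (mults : List Int) : String :=
  if dims = [] then ""
  else
    let pairs := PySem.List.sorted (dims.zip mults) Prod.fst
    "$" ++ PySem.Str.join "\\cdot"
      ((fdGroups pairs).map (fun p => PySem.Int.toStr p.1 ++ fdShowexp p.2)) ++ "$"

-- ===== PRECONDITION & SPEC =====
-- Pre_ excludes only inputs where A RAISES: nonempty dims with empty mults make
-- zip(dims, mults) empty, so zip(*sorted(Counter().items())) raises ValueError.
def Pre_formatted_dims (dims : List Int) (mults : List Int) : Prop :=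
  dims = [] ∨ mults ≠ []
instance (dims : List Int) (mults : List Int) : Decidable (Pre_formatted_dims dims mults) := by
  unfold Pre_formatted_dims; infer_instance

def pvWitness_formatted_dims : List Int × List Int := ([5, 2, 5], [1, 3, 2])

def Spec_formatted_dims (dims : List Int) (mults : List Int) (out : String) : Prop := out = formatted_dims_alt dims mults
instance (dims : List Int) (mults : List Int) (out : String) : Decidable (Spec_formatted_dims dims mults out) := by unfold Spec_formatted_dims; infer_instance

-- ===== CLAIM (what is proved, stated in full; the proofs are below) =====
def Claim_equal_formatted_dims : Prop := ∀ (dims : List Int) (mults : List Int), Dom_formatted_dims dims mults → Pre_formatted_dims dims mults → Spec_formatted_dims dims mults (formatted_dims dims mults)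

-- ===== LEMMAS AND PROOFS =====

-- total multiplicity of dimension k among the pairs (order-independent)
def fdWsum (ps : List (Int × Int)) (k : Int) : Int :=
  ((ps.filter (fun p => p.1 == k)).map Prod.snd).sum

-- the canonical collapsed list: sorted distinct dimensions with their totals
def fdCanon (ps : List (Int × Int)) : List (Int × Int) :=
  (PySem.List.sorted (PySem.Set.ofList (ps.map Prod.fst)) (fun x => x)).map
    (fun k => (k, fdWsum ps k))

lemma fd_keys_insert (d : PySem.Dict Int Int) (k : Int) (v : Int) :
    (d.insert k v).keys = PySem.Set.add d.keys k := by
  by_cases h : d.contains k <;>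
    simp [PySem.Dict.insert, h, PySem.Dict.keys, PySem.Set.add]
  · rw [if_pos]
    · apply List.map_congr_left
      intro p _
      by_cases hp : p.1 = k
      · simp [Function.comp, hp]
      · simp [Function.comp, hp]
    · rw [List.contains_iff_mem, List.mem_map]
      have := (PySem.Dict.contains_iff_mem_keys d k).mp h
      simpa [PySem.Dict.keys] using this
  · intro x hx
    have : d.contains k = true := by
      apply (PySem.Dict.contains_iff_mem_keys d k).mpr
      simp only [PySem.Dict.keys, List.mem_map]
      exact ⟨(k, x), hx, rfl⟩
    exact h this

lemma fd_keys_foldl (ps : List (Int × Int)) (d : PySem.Dict Int Int) :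
    (ps.foldl (fun d p => d.modify p.1 0 (· + p.2)) d).keys
      = PySem.Set.update d.keys (ps.map Prod.fst) := by
  induction ps generalizing d with
  | nil => simp [PySem.Set.update]
  | cons p t ih =>
    simp only [List.foldl_cons, List.map_cons, PySem.Set.update_cons]
    rw [ih, PySem.Dict.modify, fd_keys_insert]

lemma fd_getD_foldl (ps : List (Int × Int)) (d : PySem.Dict Int Int) (k : Int) :
    (ps.foldl (fun d p => d.modify p.1 0 (· + p.2)) d).getD k 0
      = d.getD k 0 + fdWsum ps k := by
  induction ps generalizing d with
  | nil => simp [fdWsum]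
  | cons p t ih =>
    simp only [List.foldl_cons]
    rw [ih]
    by_cases hp : k = p.1
    · subst hp
      rw [PySem.Dict.getD_modify_self]
      simp [fdWsum]
      ring
    · rw [PySem.Dict.getD_modify_of_ne]
      · congr 1
        simp [fdWsum, Ne.symm hp]
      · exact hp

lemma fd_items_foldl (ps : List (Int × Int)) :
    (ps.foldl (fun d p => d.modify p.1 0 (· + p.2)) PySem.Dict.empty).items
      = (PySem.Set.ofList (ps.map Prod.fst)).map (fun k => (k, fdWsum ps k)) := by
  set D := ps.foldl (fun d p => d.modify p.1 0 (· + p.2)) PySem.Dict.empty with hD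
  have hkeys : D.keys = PySem.Set.ofList (ps.map Prod.fst) := by
    rw [hD, fd_keys_foldl]
    have : (PySem.Dict.empty : PySem.Dict Int Int).keys = PySem.Set.empty := rfl
    rw [this, PySem.Set.update_empty]
  have hnd : D.keys.Nodup := by rw [hkeys]; exact PySem.Set.nodup_ofList _
  rw [PySem.Dict.items_eq_map_keys D hnd 0, hkeys]
  apply List.map_congr_left
  intro k _
  have := fd_getD_foldl ps PySem.Dict.empty k
  rw [hD, this]
  simp [PySem.Dict.getD, PySem.Dict.empty, PySem.Dict.get?]

lemma fd_sorted2_eq_lex (xs : List (Int × Int)) :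
    PySem.List.sorted2 xs Prod.fst Prod.snd
      = PySem.List.sorted xs (fun p => toLex p) := by
  show List.foldl _ [] xs = List.foldl _ [] xs
  have hb : (fun (a b : Int × Int) => decide (a.1 < b.1) || !decide (b.1 < a.1) && decide (a.2 < b.2))
      = fun (a b : Int × Int) => decide ((fun p => toLex p) a < (fun p => toLex p) b) := by
    funext a b
    by_cases h1 : a.1 < b.1 <;> by_cases h2 : b.1 < a.1 <;> by_cases h3 : a.2 < b.2 <;>
      simp [h1, h2, h3, Prod.Lex.lt_iff] <;> omega
  simp only [if_neg (by decide : ¬ (false = true))]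
  rw [hb]

lemma fd_canon_sorted2 (ps : List (Int × Int)) (its : List (Int × Int))
    (hits : its = (PySem.Set.ofList (ps.map Prod.fst)).map (fun k => (k, fdWsum ps k))) :
    PySem.List.sorted its (fun p => toLex p) = fdCanon ps := by
  apply PySem.List.sorted_eq_of_perm_of_pairwise_lt
  · rw [hits]
    unfold fdCanon
    exact (PySem.List.sorted_perm _ _ _).map _
  · unfold fdCanon
    rw [List.pairwise_map]
    have h := PySem.List.sorted_ofList_pairwise_lt (ps.map Prod.fst)
    apply h.imp
    intro a b hab
    rw [Prod.Lex.lt_iff]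
    exact Or.inl hab

lemma fd_rest_gt (t : List (Int × Int)) (d : Int)
    (hle : ∀ p ∈ t, d ≤ p.1) (hp : t.Pairwise (fun a b => a.1 ≤ b.1)) :
    ∀ p ∈ t.dropWhile (fun p => p.1 == d), d < p.1 := by
  induction t with
  | nil => simp
  | cons x t' ih =>
    by_cases hx : x.1 = d
    · rw [List.dropWhile_cons_of_pos (by simp [hx])]
      exact ih (fun p hp' => hle p (List.mem_cons_of_mem _ hp')) (List.pairwise_cons.mp hp).2
    · rw [List.dropWhile_cons_of_neg (by simp [hx])]
      intro p hpm
      rcases List.mem_cons.mp hpm with h | h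
      · subst h
        exact lt_of_le_of_ne (hle p (List.mem_cons_self)) (fun e => hx e.symm)
      · have hxd : d < x.1 := lt_of_le_of_ne (hle x List.mem_cons_self) (fun e => hx e.symm)
        exact lt_of_lt_of_le hxd ((List.pairwise_cons.mp hp).1 p h)

lemma fd_groups_canon (l : List (Int × Int))
    (h : l.Pairwise (fun a b => a.1 ≤ b.1)) : fdGroups l = fdCanon l := by
  induction l using fdGroups.induct with
  | case1 => simp [fdGroups, fdCanon, fdWsum, PySem.Set.ofList_nil, PySem.List.sorted]
  | case2 d c t =>
    rename_i ih
    have hpair := List.pairwise_cons.mp h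
    set run := t.takeWhile (fun p => p.1 == d) with hrun_def
    set rest := t.dropWhile (fun p => p.1 == d) with hrest_def
    have hle : ∀ p ∈ t, d ≤ p.1 := fun p hp => hpair.1 p hp
    have hgt : ∀ p ∈ rest, d < p.1 := fd_rest_gt t d hle hpair.2
    have hrest_pw : rest.Pairwise (fun a b => a.1 ≤ b.1) :=
      hpair.2.sublist (List.dropWhile_sublist _)
    have hrun : ∀ p ∈ run, p.1 = d := by
      intro p hp
      have := List.mem_takeWhile_imp hp
      simpa using this
    have ht : run ++ rest = t := List.takeWhile_append_dropWhile
    -- F1: the sorted distinct keys of l split off d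
    have hF1 : PySem.List.sorted (PySem.Set.ofList (((d, c) :: t).map Prod.fst)) (fun x => x)
        = d :: PySem.List.sorted (PySem.Set.ofList (rest.map Prod.fst)) (fun x => x) := by
      apply PySem.List.sorted_eq_of_perm_of_pairwise_lt
      · have hmem_sorted : ∀ x, x ∈ PySem.List.sorted (PySem.Set.ofList (rest.map Prod.fst)) (fun x => x)
            ↔ x ∈ rest.map Prod.fst := by
          intro x
          rw [PySem.List.mem_sorted, PySem.Set.mem_ofList]
        have hnd1 : (d :: PySem.List.sorted (PySem.Set.ofList (rest.map Prod.fst)) (fun x => x)).Nodup := by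
          refine List.nodup_cons.mpr ⟨?_, ?_⟩
          · intro hd
            rcases List.mem_map.mp ((hmem_sorted d).mp hd) with ⟨p, hp, he⟩
            exact absurd (hgt p hp) (by omega)
          · exact ((PySem.List.sorted_perm _ _ _).nodup_iff).mpr (PySem.Set.nodup_ofList _)
        have hnd2 : (PySem.Set.ofList (((d, c) :: t).map Prod.fst)).Nodup := PySem.Set.nodup_ofList _
        refine (List.perm_ext_iff_of_nodup hnd1 hnd2).mpr ?_
        intro x
        rw [PySem.Set.mem_ofList, List.mem_cons, hmem_sorted]
        simp only [List.map_cons, List.mem_cons]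
        constructor
        · rintro (he | hx)
          · exact Or.inl he
          · refine Or.inr ?_
            rw [← ht, List.map_append, List.mem_append]
            exact Or.inr hx
        · rintro (he | hx)
          · exact Or.inl he
          · rw [← ht, List.map_append, List.mem_append] at hx
            rcases hx with hx | hx
            · rcases List.mem_map.mp hx with ⟨p, hp, he⟩
              exact Or.inl (by rw [← he, hrun p hp])
            · exact Or.inr hx
      · refine List.pairwise_cons.mpr ⟨?_, PySem.List.sorted_ofList_pairwise_lt _⟩
        intro y hy
        rw [PySem.List.mem_sorted, PySem.Set.mem_ofList] at hy
        rcases List.mem_map.mp hy with ⟨p, hp, he⟩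
        exact he ▸ hgt p hp
    -- F2: total multiplicity at d
    have hF2 : fdWsum ((d, c) :: t) d = c + (run.map Prod.snd).sum := by
      unfold fdWsum
      rw [← ht]
      rw [List.filter_cons_of_pos (by simp), List.filter_append]
      have h1 : run.filter (fun p => p.1 == d) = run :=
        List.filter_eq_self.mpr (fun p hp => by simp [hrun p hp])
      have h2 : rest.filter (fun p => p.1 == d) = [] :=
        List.filter_eq_nil_iff.mpr (fun p hp => by
          have := hgt p hp; simp; omega)
      rw [h1, h2, List.append_nil]
      simp
    -- F3: totals at the larger keys ignore the head and the run
    have hF3 : ∀ k, d < k → fdWsum ((d, c) :: t) k = fdWsum rest k := by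
      intro k hk
      unfold fdWsum
      rw [← ht]
      rw [List.filter_cons_of_neg (by simp; omega), List.filter_append]
      have h1 : run.filter (fun p => p.1 == k) = [] :=
        List.filter_eq_nil_iff.mpr (fun p hp => by
          have := hrun p hp; simp; omega)
      rw [h1, List.nil_append]
    -- assemble
    rw [fdGroups]
    rw [ih hrest_pw]
    unfold fdCanon
    rw [hF1, List.map_cons]
    congr 1
    · rw [hF2]
    · apply List.map_congr_left
      intro k hkm
      rw [PySem.List.mem_sorted, PySem.Set.mem_ofList] at hkm
      rcases List.mem_map.mp hkm with ⟨p, hp, he⟩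
      rw [hF3 k (he ▸ hgt p hp)]

lemma fd_canon_perm (ps qs : List (Int × Int)) (h : ps.Perm qs) :
    fdCanon ps = fdCanon qs := by
  have hw : ∀ k, fdWsum ps k = fdWsum qs k := by
    intro k
    exact ((h.filter _).map _).sum_eq
  have hsort : PySem.List.sorted (PySem.Set.ofList (ps.map Prod.fst)) (fun x => x)
      = PySem.List.sorted (PySem.Set.ofList (qs.map Prod.fst)) (fun x => x) := by
    apply PySem.List.sorted_eq_sorted_of_perm _ _ _ (fun a b hab => hab)
    refine (List.perm_ext_iff_of_nodup (PySem.Set.nodup_ofList _) (PySem.Set.nodup_ofList _)).mpr ?_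
    intro x
    rw [PySem.Set.mem_ofList, PySem.Set.mem_ofList]
    exact ⟨fun hx => (h.map Prod.fst).mem_iff.mp hx, fun hx => (h.map Prod.fst).mem_iff.mpr hx⟩
  unfold fdCanon
  rw [hsort]
  exact List.map_congr_left (fun k _ => by rw [hw k])

-- ===== VERDICT (by name: the statement is the Claim_ definition above) =====
theorem formatted_dims_spec : Claim_equal_formatted_dims := by
  intro dims mults _ _
  unfold Spec_formatted_dims formatted_dims formatted_dims_alt
  by_cases h : dims = []
  · simp [h]
  · simp only [h, if_false]
    set ps := dims.zip mults with hps
    have hA : PySem.List.sorted2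
        ((ps.foldl (fun d p => d.modify p.1 0 (· + p.2)) PySem.Dict.empty).items)
        Prod.fst Prod.snd = fdCanon ps := by
      rw [fd_sorted2_eq_lex, fd_canon_sorted2 ps _ (fd_items_foldl ps)]
    have hB : fdGroups (PySem.List.sorted ps Prod.fst) = fdCanon ps := by
      rw [fd_groups_canon _ (PySem.List.sorted_pairwise ps Prod.fst)]
      exact fd_canon_perm _ _ (PySem.List.sorted_perm ps Prod.fst false)
    rw [List.zip_unzip, hA, hB]
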